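-- pv_equiv track=rewrite | github.com/nicekim2000/CodingTest | Programmers/Summer Winter Coding(~2018) 숫자 게임.py | solution
-- ===== SOURCE A (Python) =====
-- def solution(A, B):
--     n=len(A)
--     A.sort()
--     B.sort()
--
--     cnt=0
--     for i in range(n):
--         if A[i] >= B[i]:
--             find=False
--             for j in range(i+1,n):
--                 if A[i] < B[j]:
--                     B[j],B[i]=B[i],B[j]
--                     find=True
--                     break
--             if not find : break
--         cnt+=1
--
--     return cnt
-- ===== SOURCE B (Python) =====
-- def solution(A, B):
--     sa = sorted(A)
--     cnt = 0
--     for b in sorted(B)[:len(A)]: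
--         if cnt < len(sa) and b > sa[cnt]:
--             cnt += 1
--     return cnt
-- ===== Notes on version B (the rewrite author's own statement) =====
-- stated objective: faster
-- what changed: Replaces A's quadratic scan-and-swap repair loop (for each i, linear search for a larger B element and swap it in) with sort-then-single-pass two-pointer greedy counting.
import Mathlib
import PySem

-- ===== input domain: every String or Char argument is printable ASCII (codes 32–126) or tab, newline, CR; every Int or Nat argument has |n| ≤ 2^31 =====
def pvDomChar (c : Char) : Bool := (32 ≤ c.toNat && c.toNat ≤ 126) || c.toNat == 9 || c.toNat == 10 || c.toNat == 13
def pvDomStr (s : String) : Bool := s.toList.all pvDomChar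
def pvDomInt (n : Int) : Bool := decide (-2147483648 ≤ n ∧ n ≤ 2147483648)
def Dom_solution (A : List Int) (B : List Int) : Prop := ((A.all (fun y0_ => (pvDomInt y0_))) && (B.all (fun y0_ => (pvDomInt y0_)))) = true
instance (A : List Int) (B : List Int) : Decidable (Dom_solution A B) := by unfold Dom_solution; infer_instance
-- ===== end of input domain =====

-- B replaces A's quadratic scan-and-swap repair loop by a sort + one-pass two-pointer greedy
-- (same return value; note Python A sorts/permutes its argument lists in place, B does not —
-- the equivalence proved here is about the return value only).

-- ===== PORT A =====
-- inner loop 'for j in range(i+1,n): if A[i] < B[j]: swap; break' — first j in [j0,n) with ai < B[j].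
-- Indices are in range whenever Pre_solution holds, so List.getD _ _ 0 is exact there.
def pvFind (ai : Int) (B : List Int) (j n : Nat) : Option Nat :=
  if _h : j < n then
    if ai < B.getD j 0 then some j else pvFind ai B (j + 1) n
  else none
termination_by n - j

-- 'B[j],B[i]=B[i],B[j]'
def pvSwap (B : List Int) (i j : Nat) : List Int :=
  (B.set j (B.getD i 0)).set i (B.getD j 0)

-- 'for i in range(n): …' with the mutable list B, the counter cnt and the 'break'
def pvLoop (sa : List Int) (n : Nat) (B : List Int) (i : Nat) (cnt : Int) : Int :=
  if _h : i < n then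
    if B.getD i 0 ≤ sa.getD i 0 then      -- 'if A[i] >= B[i]'
      match pvFind (sa.getD i 0) B (i + 1) n with
      | some j => pvLoop sa n (pvSwap B i j) (i + 1) (cnt + 1)
      | none   => cnt                      -- 'if not find: break'
    else pvLoop sa n B (i + 1) (cnt + 1)
  else cnt
termination_by n - i

def solution (A : List Int) (B : List Int) : Int :=
  let n := A.length
  let sa := PySem.List.sorted A (fun x => x) false
  let sb := PySem.List.sorted B (fun x => x) false
  pvLoop sa n sb 0 0

-- ===== PORT B =====
def solution_alt (A : List Int) (B : List Int) : Int :=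
  let sa := PySem.List.sorted A (fun x => x) false
  let sb := PySem.List.slice (PySem.List.sorted B (fun x => x) false) none (some (A.length : Int))
  sb.foldl (fun cnt b =>
    if cnt < (sa.length : Int) ∧ PySem.List.pyGetD sa cnt 0 < b then cnt + 1 else cnt) 0

-- ===== PRECONDITION & SPEC =====
-- Pre_ excludes exactly the inputs with len(B) < len(A), on which Python A raises IndexError.
def Pre_solution (A : List Int) (B : List Int) : Prop := A.length ≤ B.length
instance (A : List Int) (B : List Int) : Decidable (Pre_solution A B) := by
  unfold Pre_solution; infer_instance

def pvWitness_solution : List Int × List Int := ([3, 1, 5], [2, 4, 1])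

def Spec_solution (A : List Int) (B : List Int) (out : Int) : Prop := out = solution_alt A B
instance (A : List Int) (B : List Int) (out : Int) : Decidable (Spec_solution A B out) := by
  unfold Spec_solution; infer_instance

-- ===== CLAIM (what is proved, stated in full; the proofs are below) =====
def Claim_equal_solution : Prop := ∀ (A : List Int) (B : List Int),
  Dom_solution A B → Pre_solution A B → Spec_solution A B (solution A B)

-- ===== LEMMAS AND PROOFS =====

-- The common abstraction: two-pointer greedy over two ascending lists.
def tp : List Int → List Int → Int
  | _, [] => 0
  | [], _ :: _ => 0
  | a :: as, b :: bs => if a < b then 1 + tp as bs else tp (a :: as) bs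
termination_by _ bs => bs.length

theorem tp_nil_left (bs : List Int) : tp [] bs = 0 := by
  cases bs <;> simp [tp]

theorem tp_all_le (a : Int) (as bs : List Int) (h : ∀ x ∈ bs, x ≤ a) :
    tp (a :: as) bs = 0 := by
  induction bs with
  | nil => simp [tp]
  | cons b bs ih =>
    have hb : b ≤ a := h b (by simp)
    simp only [tp, if_neg (not_lt.2 hb)]
    exact ih (fun x hx => h x (by simp [hx]))

theorem tp_prepend (as P bs : List Int) (h : ∀ x ∈ P, ∀ y ∈ as, x ≤ y) :
    tp as (P ++ bs) = tp as bs := by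
  induction P with
  | nil => rfl
  | cons x P ih =>
    cases as with
    | nil => simp [tp_nil_left]
    | cons a as' =>
      have hx : x ≤ a := h x (by simp) a (by simp)
      simp only [List.cons_append, tp, if_neg (not_lt.2 hx)]
      exact ih (fun z hz y hy => h z (by simp [hz]) y hy)

-- sorted S splits as (sorted of the ≤a part) ++ (the >a part) when the >a part is already ascending
theorem sorted_split (S : List Int) (a : Int)
    (h : List.Pairwise (· ≤ ·) (S.filter (fun x => decide (a < x)))) :
    PySem.List.sorted S (fun x => x) false =
      PySem.List.sorted (S.filter (fun x => decide (x ≤ a))) (fun x => x) false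
        ++ S.filter (fun x => decide (a < x)) := by
  apply PySem.List.sorted_id_eq_of_perm_of_pairwise
  · have h1 : (S.filter (fun x => decide (x ≤ a))).Perm
        (PySem.List.sorted (S.filter (fun x => decide (x ≤ a))) (fun x => x) false) :=
      (PySem.List.sorted_perm _ _ _).symm
    have h2 := List.filter_append_perm (fun x => decide (x ≤ a)) S
    have h3 : (fun x : Int => !decide (x ≤ a)) = (fun x : Int => decide (a < x)) := by
      funext x; by_cases hx : x ≤ a <;> simp [hx, lt_iff_not_ge]
    rw [h3] at h2
    exact (h1.append_right _).symm.trans h2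
  · rw [List.pairwise_append]
    refine ⟨PySem.List.sorted_pairwise _ _, h, ?_⟩
    intro x hx y hy
    have hxa : x ≤ a := by
      have := (PySem.List.mem_sorted _ _ _ _).1 hx
      simpa using (List.of_mem_filter this)
    have hay : a < y := by simpa using (List.of_mem_filter hy)
    omega

-- B's fold is the two-pointer greedy
theorem foldB_eq_tp (sa : List Int) :
    ∀ (bs : List Int) (c : Nat),
      bs.foldl (fun cnt b =>
        if cnt < (sa.length : Int) ∧ PySem.List.pyGetD sa cnt 0 < b then cnt + 1 else cnt)
        (c : Int)
      = (c : Int) + tp (sa.drop c) bs := by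
  intro bs
  induction bs with
  | nil => intro c; simp [tp]
  | cons b bs ih =>
    intro c
    by_cases hc : c < sa.length
    · have hdrop : sa.drop c = sa[c] :: sa.drop (c + 1) := List.drop_eq_getElem_cons hc
      have hget : PySem.List.pyGetD sa (c : Int) 0 = sa[c] := by
        rw [PySem.List.pyGetD_natCast]; simp [List.getD, hc]
      by_cases hlt : sa[c] < b
      · have : ((c : Int) < (sa.length : Int) ∧ PySem.List.pyGetD sa (c : Int) 0 < b) := by
          constructor
          · exact_mod_cast hc
          · rw [hget]; exact hlt
        simp only [List.foldl_cons, if_pos this]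
        have : ((c : Int) + 1) = ((c + 1 : Nat) : Int) := by push_cast; ring
        rw [this, ih (c + 1), hdrop]
        simp only [tp, if_pos hlt]
        push_cast; ring
      · have : ¬ ((c : Int) < (sa.length : Int) ∧ PySem.List.pyGetD sa (c : Int) 0 < b) := by
          rw [hget]; intro ⟨_, h2⟩; exact hlt h2
        simp only [List.foldl_cons, if_neg this]
        rw [ih c, hdrop]
        simp only [tp, if_neg hlt]
    · have hdrop : sa.drop c = [] := List.drop_eq_nil_of_le (by omega)
      have : ¬ ((c : Int) < (sa.length : Int) ∧ PySem.List.pyGetD sa (c : Int) 0 < b) := by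
        intro ⟨h1, _⟩; exact hc (by exact_mod_cast h1)
      simp only [List.foldl_cons, if_neg this]
      rw [ih c, hdrop, tp_nil_left, tp_nil_left]

-- pvFind characterisations
theorem pvFind_none (ai : Int) (B : List Int) :
    ∀ (k j n : Nat), n - j = k → pvFind ai B j n = none →
      ∀ m, j ≤ m → m < n → B.getD m 0 ≤ ai := by
  intro k
  induction k with
  | zero => intro j n hk hf m h1 h2; omega
  | succ k ih =>
    intro j n hk hf m h1 h2
    have hj : j < n := by omega
    rw [pvFind, dif_pos hj] at hf
    by_cases hb : ai < B.getD j 0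
    · rw [if_pos hb] at hf; exact absurd hf (by simp)
    · rw [if_neg hb] at hf
      rcases Nat.eq_or_lt_of_le h1 with h | h
      · exact h ▸ not_lt.1 hb
      · exact ih (j + 1) n (by omega) hf m (by omega) h2

theorem pvFind_some (ai : Int) (B : List Int) :
    ∀ (k j n r : Nat), n - j = k → pvFind ai B j n = some r →
      j ≤ r ∧ r < n ∧ ai < B.getD r 0 ∧ ∀ m, j ≤ m → m < r → B.getD m 0 ≤ ai := by
  intro k
  induction k with
  | zero =>
    intro j n r hk hf
    rw [pvFind, dif_neg (by omega)] at hf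
    exact absurd hf (by simp)
  | succ k ih =>
    intro j n r hk hf
    have hj : j < n := by omega
    rw [pvFind, dif_pos hj] at hf
    by_cases hb : ai < B.getD j 0
    · rw [if_pos hb] at hf
      obtain rfl : j = r := by simpa using hf
      exact ⟨le_refl _, hj, hb, fun m h1 h2 => by omega⟩
    · rw [if_neg hb] at hf
      obtain ⟨H1, H2, H3, H4⟩ := ih (j + 1) n r (by omega) hf
      refine ⟨by omega, H2, H3, ?_⟩
      intro m h1 h2
      rcases Nat.eq_or_lt_of_le h1 with h | h
      · subst h; exact not_lt.1 hb
      · exact H4 m (by omega) h2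
  

theorem mem_take_drop_exists (B : List Int) (n i : Nat) (hn : n ≤ B.length) :
    ∀ x ∈ (B.take n).drop i, ∃ m, i ≤ m ∧ m < n ∧ B.getD m 0 = x := by
  intro x hx
  obtain ⟨p, hp, hpx⟩ := List.mem_iff_getElem.1 hx
  have hlt : i + p < n := by
    have : ((B.take n).drop i).length = n - i := by simp; omega
    omega
  refine ⟨i + p, by omega, hlt, ?_⟩
  rw [List.getD_eq_getElem B 0 (by omega), ← hpx, List.getElem_drop, List.getElem_take]

theorem swap_take_drop (B : List Int) (n i j : Nat) (hij : i < j) (hjn : j < n)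
    (hn : n ≤ B.length) :
    ((pvSwap B i j).take n).drop (i + 1)
      = ((B.take n).drop (i + 1)).set (j - i - 1) (B.getD i 0) := by
  have hlen : (pvSwap B i j).length = B.length := by simp [pvSwap]
  apply List.ext_getElem
  · simp [hlen]
  · intro p h1 h2
    have hp : i + 1 + p < n := by simp [hlen] at h1; omega
    rw [List.getElem_drop, List.getElem_take]
    rw [List.getElem_set (by simp; omega)]
    have hpB : i + 1 + p < B.length := by omega
    simp only [pvSwap]
    rw [List.getElem_set (by simpa using hpB), List.getElem_set (by simpa using hpB)]
    have hne : ¬ i = i + 1 + p := by omega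
    rw [if_neg hne]
    rw [List.getElem_drop, List.getElem_take]
    by_cases hj : j = i + 1 + p
    · rw [if_pos hj, if_pos (by omega)]
    · rw [if_neg hj, if_neg (by omega)]

theorem filter_gt_of_le (a a' : Int) (h : a ≤ a') (l : List Int) :
    l.filter (fun x => decide (a' < x))
      = (l.filter (fun x => decide (a < x))).filter (fun x => decide (a' < x)) := by
  rw [List.filter_filter]
  apply List.filter_congr
  intro x _
  by_cases h' : a' < x
  · simp [h', show a < x by omega]
  · simp [h']

theorem mem_sorted_le (X : List Int) (a x : Int)
    (hx : x ∈ PySem.List.sorted (X.filter (fun y => decide (y ≤ a))) (fun y => y) false) :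
    x ≤ a := by
  have := (PySem.List.mem_sorted _ _ _ _).1 hx
  simpa using List.of_mem_filter this

-- the A-side loop computes the two-pointer greedy of the sorted remainder
theorem pvLoop_eq_tp (sa : List Int) (n : Nat)
    (hs : List.Pairwise (· ≤ ·) sa) (hlen : sa.length = n) :
    ∀ (k i : Nat) (B : List Int) (cnt : Int), i + k = n → n ≤ B.length →
      (i < n → List.Pairwise (· ≤ ·)
        (((B.take n).drop i).filter (fun x => decide (sa.getD i 0 < x)))) →
      pvLoop sa n B i cnt
        = cnt + tp (sa.drop i) (PySem.List.sorted ((B.take n).drop i) (fun x => x) false) := by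
  intro k
  induction k with
  | zero =>
    intro i B cnt hik hB _
    rw [pvLoop, dif_neg (by omega)]
    rw [List.drop_eq_nil_of_le (by omega : sa.length ≤ i), tp_nil_left, add_zero]
  | succ k ih =>
    intro i B cnt hik hB hinv
    have hi : i < n := by omega
    have hisa : i < sa.length := by omega
    rw [pvLoop, dif_pos hi]
    set a := sa.getD i 0 with ha
    set bi := B.getD i 0 with hbi
    set T := (B.take n).drop (i + 1) with hT
    have haget : a = sa[i] := List.getD_eq_getElem sa 0 hisa
    have hdropsa : sa.drop i = a :: sa.drop (i + 1) := by
      rw [List.drop_eq_getElem_cons hisa, haget]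
    have ha_le : ∀ y ∈ sa.drop (i + 1), a ≤ y := by
      have hp : List.Pairwise (· ≤ ·) (sa.drop i) :=
        List.Pairwise.sublist (List.drop_sublist _ _) hs
      rw [hdropsa] at hp
      exact (List.pairwise_cons.1 hp).1
    have hTake : (B.take n).length = n := by simp; omega
    have hS : (B.take n).drop i = bi :: T := by
      rw [List.drop_eq_getElem_cons (by omega : i < (B.take n).length)]
      congr 1
      rw [List.getElem_take]
      exact (List.getD_eq_getElem B 0 (by omega)).symm
    have hTlen : T.length = n - (i + 1) := by rw [hT]; simp; omega
    have hTelem : ∀ (p : Nat) (hp : p < T.length), T[p] = B.getD (i + 1 + p) 0 := by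
      intro p hp
      have hpn : i + 1 + p < n := by omega
      simp only [hT, List.getElem_drop, List.getElem_take]
      exact (List.getD_eq_getElem B 0 (by omega)).symm
    have hP1 : ∀ x ∈ PySem.List.sorted
        (((B.take n).drop i).filter (fun y => decide (y ≤ a))) (fun y => y) false,
        ∀ y ∈ a :: sa.drop (i + 1), x ≤ y := by
      intro x hx y hy
      have hxa := mem_sorted_le _ _ _ hx
      rcases List.mem_cons.1 hy with rfl | hy'
      · exact hxa
      · exact le_trans hxa (ha_le y hy')
    by_cases hcase : bi ≤ a
    · rw [if_pos hcase]
      cases hfind : pvFind a B (i + 1) n with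
      | none =>
        show cnt = _
        have hall : ∀ x ∈ PySem.List.sorted ((B.take n).drop i) (fun x => x) false, x ≤ a := by
          intro x hx
          have hx' := (PySem.List.mem_sorted _ _ _ _).1 hx
          obtain ⟨m, hm1, hm2, hm3⟩ := mem_take_drop_exists B n i hB x hx'
          rcases Nat.eq_or_lt_of_le hm1 with he | hlt
          · rw [← hm3, ← he]; exact hcase
          · rw [← hm3]
            exact pvFind_none a B (n - (i + 1)) (i + 1) n rfl hfind m (by omega) hm2
        rw [hdropsa, tp_all_le _ _ _ hall, add_zero]
      | some j =>
        show pvLoop sa n (pvSwap B i j) (i + 1) (cnt + 1) = _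
        obtain ⟨hj1, hj2, hj3, hj4⟩ := pvFind_some a B (n - (i + 1)) (i + 1) n j rfl hfind
        set bj := B.getD j 0 with hbj
        set m := j - i - 1 with hm
        have hmT : m < T.length := by omega
        have hTm : T[m]'hmT = bj := by
          rw [hTelem m hmT, show i + 1 + m = j by omega]
        have hTakeLe : ∀ x ∈ T.take m, x ≤ a := by
          intro x hx
          obtain ⟨p, hp, hpx⟩ := List.mem_iff_getElem.1 hx
          have hpm : p < m ∧ p < T.length := by simp at hp; omega
          rw [List.getElem_take] at hpx
          rw [hTelem p hpm.2] at hpx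
          rw [← hpx]
          exact hj4 (i + 1 + p) (by omega) (by omega)
        have hTdecomp : T = T.take m ++ bj :: T.drop (m + 1) := by
          conv_lhs => rw [← List.take_append_drop m T, List.drop_eq_getElem_cons hmT, hTm]
        have hS2 : T.set m bi = T.take m ++ bi :: T.drop (m + 1) :=
          List.set_eq_take_cons_drop bi hmT
        have hfiltTake : (T.take m).filter (fun x => decide (a < x)) = [] := by
          rw [List.filter_eq_nil_iff]
          intro x hx
          simpa using not_lt.2 (hTakeLe x hx)
        have hfS : ((B.take n).drop i).filter (fun x => decide (a < x))
            = bj :: (T.drop (m + 1)).filter (fun x => decide (a < x)) := by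
          rw [hS]
          conv_lhs => rw [hTdecomp]
          simp [List.filter_append, hfiltTake,
            show ¬a < bi by omega, hj3]
        have hR : List.Pairwise (· ≤ ·) ((T.drop (m + 1)).filter (fun x => decide (a < x))) := by
          have := hinv hi
          rw [hfS] at this
          exact (List.pairwise_cons.1 this).2
        have hfS2 : (T.set m bi).filter (fun x => decide (a < x))
            = (T.drop (m + 1)).filter (fun x => decide (a < x)) := by
          rw [hS2]
          simp [List.filter_append, hfiltTake, show ¬a < bi by omega]
        have hinv2 : i + 1 < n → List.Pairwise (· ≤ ·)
            ((((pvSwap B i j).take n).drop (i + 1)).filter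
              (fun x => decide (sa.getD (i + 1) 0 < x))) := by
          intro hi1
          have ha' : a ≤ sa.getD (i + 1) 0 := by
            rw [List.getD_eq_getElem sa 0 (by omega : i + 1 < sa.length)]
            apply ha_le
            rw [List.drop_eq_getElem_cons (by omega : i + 1 < sa.length)]
            exact List.mem_cons_self ..
          rw [swap_take_drop B n i j (by omega) hj2 hB]
          rw [filter_gt_of_le a _ ha', hfS2]
          exact hR.filter _
        have hrec := ih (i + 1) (pvSwap B i j) (cnt + 1) (by omega)
          (by simp [pvSwap]; omega) hinv2
        rw [swap_take_drop B n i j (by omega) hj2 hB] at hrec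
        rw [hrec, hdropsa]
        rw [sorted_split ((B.take n).drop i) a (hinv hi), hfS,
          tp_prepend _ _ _ hP1]
        rw [sorted_split (T.set m bi) a (by rw [hfS2]; exact hR), hfS2]
        have hP2 : ∀ x ∈ PySem.List.sorted
            (((T.set m bi)).filter (fun y => decide (y ≤ a))) (fun y => y) false,
            ∀ y ∈ sa.drop (i + 1), x ≤ y := by
          intro x hx y hy
          exact le_trans (mem_sorted_le _ _ _ hx) (ha_le y hy)
        rw [tp_prepend _ _ _ hP2]
        simp only [tp, if_pos hj3]
        ring
    · rw [if_neg hcase]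
      have habi : a < bi := by omega
      have hfSneg : ((B.take n).drop i).filter (fun x => decide (a < x))
          = bi :: T.filter (fun x => decide (a < x)) := by
        rw [hS]
        simp [habi]
      have hPairT : List.Pairwise (· ≤ ·) (T.filter (fun x => decide (a < x))) := by
        have := hinv hi
        rw [hfSneg] at this
        exact (List.pairwise_cons.1 this).2
      have hinv2 : i + 1 < n → List.Pairwise (· ≤ ·)
          (((B.take n).drop (i + 1)).filter (fun x => decide (sa.getD (i + 1) 0 < x))) := by
        intro hi1
        have ha' : a ≤ sa.getD (i + 1) 0 := by
          apply ha_le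
          rw [List.drop_eq_getElem_cons (by omega : i + 1 < sa.length),
            List.getD_eq_getElem sa 0 (by omega : i + 1 < sa.length)]
          exact List.mem_cons_self ..
        rw [filter_gt_of_le a _ ha']
        exact hPairT.filter _
      have hrec := ih (i + 1) B (cnt + 1) (by omega) hB hinv2
      rw [hrec, hdropsa]
      rw [sorted_split ((B.take n).drop i) a (hinv hi), hfSneg,
        tp_prepend _ _ _ hP1]
      rw [sorted_split T a hPairT]
      have hP3 : ∀ x ∈ PySem.List.sorted
          (T.filter (fun y => decide (y ≤ a))) (fun y => y) false,
          ∀ y ∈ sa.drop (i + 1), x ≤ y := by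
        intro x hx y hy
        exact le_trans (mem_sorted_le _ _ _ hx) (ha_le y hy)
      rw [tp_prepend _ _ _ hP3]
      simp only [tp, if_pos habi]
      ring

-- ===== VERDICT (by name: the statement is the Claim_ definition above) =====
theorem solution_spec : Claim_equal_solution := by
  intro A B _ hpre
  unfold Spec_solution solution solution_alt
  simp only []
  set sa := PySem.List.sorted A (fun x => x) false with hsadef
  set sb := PySem.List.sorted B (fun x => x) false with hsbdef
  have hs : List.Pairwise (· ≤ ·) sa := by
    simpa using PySem.List.sorted_pairwise (xs := A) (key := fun x => x)
  have hpair_sb : List.Pairwise (· ≤ ·) sb := by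
    simpa using PySem.List.sorted_pairwise (xs := B) (key := fun x => x)
  have hlen : sa.length = A.length := PySem.List.length_sorted A (fun x => x) false
  have hnb : A.length ≤ sb.length := by
    rw [hsbdef, PySem.List.length_sorted B (fun x => x) false]; exact hpre
  have htpair : List.Pairwise (· ≤ ·) (sb.take A.length) :=
    List.Pairwise.sublist (List.take_sublist _ _) hpair_sb
  have hinv0 : 0 < A.length → List.Pairwise (· ≤ ·)
      (((sb.take A.length).drop 0).filter (fun x => decide (sa.getD 0 0 < x))) := by
    intro _
    rw [List.drop_zero]
    exact htpair.filter _
  rw [PySem.List.slice_to_natCast]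
  rw [pvLoop_eq_tp sa A.length hs hlen A.length 0 sb 0 (by omega) hnb hinv0]
  have hfold := foldB_eq_tp sa (sb.take A.length) 0
  simp only [Nat.cast_zero] at hfold
  rw [hfold, List.drop_zero, List.drop_zero]
  rw [PySem.List.sorted_eq_self_of_pairwise (xs := sb.take A.length) (key := fun x => x)
    (by simpa using htpair)]
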